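-- pv_equiv track=rewrite | github.com/po4yka/obsidian-to-anki | src/obsidian_anki_sync/agents/specialized/code.py | _repair_code_fences
-- ===== SOURCE A (Python) =====
-- def _repair_code_fences(content: str) -> str:
--     """Repair code fence issues using pattern matching."""
--     lines = content.splitlines()
--     repaired_lines = []
--     fence_stack = []
--
--     for line in lines:
--         stripped = line.strip()
--
--         if stripped.startswith("```"):
--             if fence_stack:
--                 fence_stack.pop()
--                 repaired_lines.append(line)
--             else:
--                 fence_stack.append(stripped)
--                 repaired_lines.append(line)
--         else:
--             repaired_lines.append(line)
--
--     # Close any remaining open fences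
--     while fence_stack:
--         repaired_lines.append("```")
--         fence_stack.pop()
--
--     return "\n".join(repaired_lines)
-- ===== SOURCE B (Python) =====
-- def _repair_code_fences(content: str) -> str:
--     """Repair code fence issues: parity count instead of a stack."""
--     lines = content.splitlines()
--     fences = sum(1 for line in lines if line.strip().startswith("```"))
--     if fences % 2 == 1:
--         lines.append("```")
--     return "\n".join(lines)
-- ===== Notes on version B (the rewrite author's own statement) =====
-- stated objective: simpler
-- what changed: Replaces the fence stack and line-copying loop with a single parity count of fence lines, appending one closing fence to the unchanged splitlines list when the count is odd.
import Mathlib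
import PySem

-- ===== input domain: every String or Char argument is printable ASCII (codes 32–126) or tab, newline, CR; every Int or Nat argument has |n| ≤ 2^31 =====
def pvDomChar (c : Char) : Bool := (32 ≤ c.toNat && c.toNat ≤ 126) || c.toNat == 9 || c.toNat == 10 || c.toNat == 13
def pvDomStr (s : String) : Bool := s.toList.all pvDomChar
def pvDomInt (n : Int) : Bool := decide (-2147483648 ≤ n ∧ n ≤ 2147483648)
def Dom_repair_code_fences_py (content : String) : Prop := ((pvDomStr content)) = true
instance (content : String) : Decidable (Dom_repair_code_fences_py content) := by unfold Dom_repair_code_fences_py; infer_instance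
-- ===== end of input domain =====

-- B replaces A's fence stack and line-copying loop with a parity count of fence lines (objective: simpler).


-- ===== PORT A =====
-- the for-loop of A: state is (repaired_lines, fence_stack)
def repairLoopA : List String → List String → List String → (List String × List String)
  | [], acc, stack => (acc, stack)
  | line :: ls, acc, stack =>
    if PySem.Str.startswith (PySem.Str.strip line) "```" then
      match stack with
      | _ :: rest => repairLoopA ls (acc ++ [line]) rest
      | [] => repairLoopA ls (acc ++ [line]) [PySem.Str.strip line]
    else repairLoopA ls (acc ++ [line]) stack

def repair_code_fences_py (content : String) : String :=
  let p := repairLoopA (PySem.Str.splitlines content) [] []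
  -- the trailing while-loop appends "```" once per remaining stack entry
  PySem.Str.join "\n" (p.1 ++ List.replicate p.2.length "```")

-- ===== PORT B =====
def repair_code_fences_py_alt (content : String) : String :=
  let lines := PySem.Str.splitlines content
  let fences := lines.countP (fun line => PySem.Str.startswith (PySem.Str.strip line) "```")
  PySem.Str.join "\n" (if fences % 2 == 1 then lines ++ ["```"] else lines)

-- ===== PRECONDITION & SPEC =====
def Spec_repair_code_fences_py (content : String) (out : String) : Prop := out = repair_code_fences_py_alt content
instance (content : String) (out : String) : Decidable (Spec_repair_code_fences_py content out) := by unfold Spec_repair_code_fences_py; infer_instance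

-- ===== CLAIM (what is proved, stated in full; the proofs are below) =====
def Claim_equal_repair_code_fences_py : Prop := ∀ (content : String), Dom_repair_code_fences_py content → Spec_repair_code_fences_py content (repair_code_fences_py content)

-- ===== LEMMAS AND PROOFS =====
theorem repairLoopA_fst : ∀ (ls acc stack : List String), (repairLoopA ls acc stack).1 = acc ++ ls := by
  intro ls
  induction ls with
  | nil => intro acc stack; simp [repairLoopA]
  | cons l t ih =>
    intro acc stack
    simp only [repairLoopA]
    split
    · cases stack <;> simp [ih]
    · simp [ih]

theorem repairLoopA_snd_len : ∀ (ls stack acc : List String), stack.length ≤ 1 →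
    (repairLoopA ls acc stack).2.length
      = (stack.length + ls.countP (fun l => PySem.Str.startswith (PySem.Str.strip l) "```")) % 2 := by
  intro ls
  induction ls with
  | nil =>
    intro stack acc h
    simp only [repairLoopA, List.countP_nil, Nat.add_zero]
    omega
  | cons l t ih =>
    intro stack acc h
    simp only [repairLoopA, List.countP_cons]
    split
    · rename_i hf
      cases stack with
      | nil =>
        rw [ih _ _ (by simp)]
        simp only [List.length_cons, List.length_nil]
        omega
      | cons s rest =>
        simp only [List.length_cons] at h
        rw [ih _ _ (by omega)]
        simp only [List.length_cons]
        omega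
    · rename_i hf
      rw [ih _ _ h]
      omega

-- ===== VERDICT (by name: the statement is the Claim_ definition above) =====
theorem repair_code_fences_py_spec : Claim_equal_repair_code_fences_py := by
  intro content _
  unfold Spec_repair_code_fences_py repair_code_fences_py repair_code_fences_py_alt
  simp only [repairLoopA_fst, List.nil_append,
    repairLoopA_snd_len (PySem.Str.splitlines content) [] [] (by simp), List.length_nil,
    Nat.zero_add]
  rcases Nat.mod_two_eq_zero_or_one
      ((PySem.Str.splitlines content).countP (fun l => PySem.Str.startswith (PySem.Str.strip l) "```")) with h | h <;>
    rw [h] <;> simp
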